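-- pv_equiv track=rewrite | github.com/TheGadflyProject/TheGadflyProject | vandalizer.py | question_generation
-- ===== SOURCE A (Python) =====
-- def question_generation(selected_sents):
--     """ Remove blank and display question"""
--     possible_questions = []
--     for sent in selected_sents:
--         last_n = -2
--         last_answer = ""
--         last_temp_sent = ""
--         for n, (token, pos) in enumerate(sent):
--             if pos in ["NNP", "NNPS"]:
--
--                 if n-1 == last_n:
--                     # deals (poorly) with NNP/NNPS phrases
--                     answer = last_answer + " " + token
--                     last_temp_sent[n] = ""
--                     temp_sent = last_temp_sent
--                     possible_questions.pop()
--                 else: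
--                     answer = token
--                     temp_sent = [token for token, pos in sent]
--                     temp_sent[n] = "__________"
--                 possible_questions.append((" ".join(temp_sent), answer))
--                 last_answer = answer
--                 last_temp_sent = temp_sent
--                 last_n = n
--     return possible_questions
-- ===== SOURCE B (Python) =====
-- def question_generation(selected_sents):
--     """ Remove blank and display question"""
--     possible_questions = []
--     for sent in selected_sents:
--         toks = [token for token, pos in sent]
--         i = 0
--         while i < len(sent):
--             if sent[i][1] in ["NNP", "NNPS"]:
--                 m = 0
--                 while i + m + 1 < len(sent) and sent[i + m + 1][1] in ["NNP", "NNPS"]: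
--                     m += 1
--                 blanked = list(toks)
--                 blanked[i] = "__________"
--                 for k in range(i + 1, i + m + 1):
--                     blanked[k] = ""
--                 possible_questions.append((" ".join(blanked), " ".join(toks[i:i + m + 1])))
--                 i = i + m + 1
--             else:
--                 i += 1
--     return possible_questions
-- ===== Notes on version B (the rewrite author's own statement) =====
-- stated objective: alternative
-- what changed: Replaces A's pop-and-remutate state machine (per-token enumerate loop that appends a question per proper-noun token, then pops and patches it when the run extends) with a direct scan over maximal NNP/NNPS runs that emits exactly one question per run.
import Mathlib
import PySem

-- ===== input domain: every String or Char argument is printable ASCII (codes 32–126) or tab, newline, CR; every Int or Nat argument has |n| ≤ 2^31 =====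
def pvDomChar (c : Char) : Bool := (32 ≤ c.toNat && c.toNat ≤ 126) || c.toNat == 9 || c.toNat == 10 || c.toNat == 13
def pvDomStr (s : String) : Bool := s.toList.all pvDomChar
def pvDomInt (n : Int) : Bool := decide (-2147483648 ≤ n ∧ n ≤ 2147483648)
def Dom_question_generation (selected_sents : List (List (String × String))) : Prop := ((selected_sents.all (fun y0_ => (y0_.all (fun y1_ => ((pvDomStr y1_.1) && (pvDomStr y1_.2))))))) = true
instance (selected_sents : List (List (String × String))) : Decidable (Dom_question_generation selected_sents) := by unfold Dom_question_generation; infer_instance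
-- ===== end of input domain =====

-- B replaces A's per-token pop-and-remutate state machine by a direct scan over
-- maximal NNP/NNPS runs, emitting one (blanked sentence, answer) pair per run.

-- ===== PORT A =====

-- pos in ["NNP", "NNPS"]
def pvNNP (pos : String) : Bool := pos == "NNP" || pos == "NNPS"

-- one iteration of A's inner `for n, (token, pos) in enumerate(sent)` loop;
-- state = (possible_questions, last_n, last_answer, last_temp_sent).
-- Python's initial last_temp_sent = "" is ported as [] : List String — it is only
-- indexed when n-1 == last_n ≥ 0, i.e. after last_temp_sent was assigned a list.
-- possible_questions.pop() is ported as dropLast: it always succeeds here, since a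
-- question was appended in the immediately preceding NNP/NNPS step (last_n = n-1).
def pvAStep (sent : List (String × String))
    (st : List (String × String) × Int × String × List String)
    (p : Int × (String × String)) :
    List (String × String) × Int × String × List String :=
  let (qs, lastN, lastAnswer, lastTemp) := st
  let (n, (token, pos)) := p
  if pvNNP pos then
    if n - 1 == lastN then
      let answer := lastAnswer ++ " " ++ token
      let tempSent := PySem.List.pySetD lastTemp n ""   -- last_temp_sent[n] = "" (n always in range)
      (qs.dropLast ++ [(PySem.Str.join " " tempSent, answer)], n, answer, tempSent)
    else
      let answer := token
      let tempSent := PySem.List.pySetD (sent.map (fun tp => tp.1)) n "__________"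
      (qs ++ [(PySem.Str.join " " tempSent, answer)], n, answer, tempSent)
  else (qs, lastN, lastAnswer, lastTemp)

def question_generation (selected_sents : List (List (String × String))) : List (String × String) :=
  selected_sents.foldl
    (fun possible_questions sent =>
      ((PySem.List.enumerate sent 0).foldl (pvAStep sent) (possible_questions, -2, "", [])).1)
    []

-- ===== PORT B =====

-- number of consecutive indices ≥ k whose pos is NNP/NNPS (Source B's inner `while`)
def pvRunLen (sent : List (String × String)) (k : Nat) : Nat :=
  if h : k < sent.length then
    if pvNNP (sent[k]).2 then pvRunLen sent (k + 1) + 1 else 0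
  else 0
  termination_by sent.length - k

-- blanked = copy of toks with index i set to "__________" and i+1..i+m set to ""
-- (the `for k in range(i+1, i+m+1)` loop; bounds are Nat, so range' (i+1) m)
def pvBlank (toks : List String) (i m : Nat) : List String :=
  (List.range' (i + 1) m).foldl (fun l k => l.set k "") (toks.set i "__________")

-- Source B's outer `while i < len(sent)` loop; toks[i:i+m+1] = (toks.drop i).take (m+1)
-- (PySem.List.slice_natCast_add: natural bounds)
def pvBLoop (sent : List (String × String)) (toks : List String) (i : Nat)
    (acc : List (String × String)) : List (String × String) :=
  if h : i < sent.length then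
    if pvNNP (sent[i]).2 then
      let m := pvRunLen sent (i + 1)
      acc ++ [(PySem.Str.join " " (pvBlank toks i m), PySem.Str.join " " ((toks.drop i).take (m + 1)))]
        |> pvBLoop sent toks (i + m + 1)
    else pvBLoop sent toks (i + 1) acc
  else acc
  termination_by sent.length - i

def question_generation_alt (selected_sents : List (List (String × String))) : List (String × String) :=
  selected_sents.foldl
    (fun possible_questions sent => pvBLoop sent (sent.map (fun tp => tp.1)) 0 possible_questions)
    []

-- ===== PRECONDITION & SPEC =====
def Spec_question_generation (selected_sents : List (List (String × String))) (out : List (String × String)) : Prop := out = question_generation_alt selected_sents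
instance (selected_sents : List (List (String × String))) (out : List (String × String)) : Decidable (Spec_question_generation selected_sents out) := by unfold Spec_question_generation; infer_instance

-- ===== CLAIM (what is proved, stated in full; the proofs are below) =====
def Claim_equal_question_generation : Prop := ∀ (selected_sents : List (List (String × String))), Dom_question_generation selected_sents → Spec_question_generation selected_sents (question_generation selected_sents)

-- ===== LEMMAS AND PROOFS =====

-- A's inner fold, started at token index i (state threaded over the enumerated suffix)
def pvF (sent : List (String × String)) (i : Nat)
    (st : List (String × String) × Int × String × List String) :
    List (String × String) × Int × String × List String :=
  (PySem.List.enumerate (sent.drop i) (i : Int)).foldl (pvAStep sent) st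

lemma pvF_stop (sent : List (String × String)) (i : Nat) (h : sent.length ≤ i) (st) :
    pvF sent i st = st := by
  unfold pvF
  rw [List.drop_eq_nil_of_le h]
  simp [PySem.List.enumerate]

lemma pvF_cons (sent : List (String × String)) (i : Nat) (h : i < sent.length) (st) :
    pvF sent i st = pvF sent (i + 1) (pvAStep sent st ((i : Int), sent[i])) := by
  unfold pvF
  rw [List.drop_eq_getElem_cons h, PySem.List.enumerate_cons]
  simp only [List.foldl_cons]
  norm_cast

lemma pvBLoop_stop (sent : List (String × String)) (toks : List String) (i : Nat)
    (h : sent.length ≤ i) (acc) : pvBLoop sent toks i acc = acc := by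
  rw [pvBLoop]; simp [Nat.not_lt.mpr h]

lemma pvBLoop_skip (sent : List (String × String)) (toks : List String) (i : Nat)
    (h : i < sent.length) (hn : pvNNP (sent[i]).2 = false) (acc) :
    pvBLoop sent toks i acc = pvBLoop sent toks (i + 1) acc := by
  rw [pvBLoop]; simp [h, hn]

lemma pvBLoop_run (sent : List (String × String)) (toks : List String) (i : Nat)
    (h : i < sent.length) (hn : pvNNP (sent[i]).2 = true) (acc) :
    pvBLoop sent toks i acc =
      pvBLoop sent toks (i + pvRunLen sent (i + 1) + 1)
        (acc ++ [(PySem.Str.join " " (pvBlank toks i (pvRunLen sent (i + 1))),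
                  PySem.Str.join " " ((toks.drop i).take (pvRunLen sent (i + 1) + 1)))]) := by
  rw [pvBLoop]; simp [h, hn]

lemma pvRunLen_stop (sent : List (String × String)) (k : Nat) (h : sent.length ≤ k) :
    pvRunLen sent k = 0 := by
  rw [pvRunLen]; simp [Nat.not_lt.mpr h]

lemma pvRunLen_neg (sent : List (String × String)) (k : Nat) (h : k < sent.length)
    (hn : pvNNP (sent[k]).2 = false) : pvRunLen sent k = 0 := by
  rw [pvRunLen]; simp [h, hn]

lemma pvRunLen_pos (sent : List (String × String)) (k : Nat) (h : k < sent.length)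
    (hn : pvNNP (sent[k]).2 = true) : pvRunLen sent k = pvRunLen sent (k + 1) + 1 := by
  rw [pvRunLen]; simp [h, hn]

-- " ".join (x :: ys) built left to right, the way A accumulates last_answer
lemma pvJoin_run (x : String) (ys : List String) :
    PySem.Str.join " " (x :: ys) = ys.foldl (fun a t => a ++ " " ++ t) x := by
  induction ys generalizing x with
  | nil => simp [PySem.Str.join, PySem.Chars.join, List.intercalate]
  | cons y ys ih =>
    rw [List.foldl_cons, ← ih (x ++ " " ++ y)]
    apply String.ext -- equality of the underlying char lists
    simp only [PySem.Str.join, PySem.Chars.join, List.intercalate, List.map_cons]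
    cases ys with
    | nil => simp
    | cons z zs => simp [List.append_assoc]

-- main invariant: both halves by simultaneous strong induction on sent.length - i.
-- Part 1: from a "fresh" state (last_n < i-1, so no run can extend), A's fold from
--         index i equals B's run scan from i.
-- Part 2: mid-run: the question for the current run was just appended with blanked
--         list lt and answer la; A's fold from i+1 extends it across the remaining
--         run and then proceeds freshly.
lemma pvMain (sent : List (String × String)) :
    ∀ K i, sent.length - i ≤ K →
    ((∀ qs lastN la lt, lastN < (i : Int) - 1 →
        (pvF sent i (qs, lastN, la, lt)).1 = pvBLoop sent (sent.map (fun tp => tp.1)) i qs)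
     ∧ (∀ (hi : i < sent.length), pvNNP (sent[i]).2 = true →
        ∀ (qs : List (String × String)) (la : String) (lt : List String),
          (pvF sent (i + 1) (qs ++ [(PySem.Str.join " " lt, la)], (i : Int), la, lt)).1
          = pvBLoop sent (sent.map (fun tp => tp.1)) (i + pvRunLen sent (i + 1) + 1)
              (qs ++ [(PySem.Str.join " "
                         ((List.range' (i + 1) (pvRunLen sent (i + 1))).foldl
                            (fun l k => l.set k "") lt),
                       (((sent.map (fun tp => tp.1)).drop (i + 1)).take (pvRunLen sent (i + 1))).foldl
                         (fun a t => a ++ " " ++ t) la)]))) := by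
  intro K
  induction K with
  | zero =>
    intro i hK
    have hlen : sent.length ≤ i := by omega
    constructor
    · intro qs lastN la lt _
      rw [pvF_stop sent i hlen, pvBLoop_stop sent _ i hlen]
    · intro hi; omega
  | succ K ih =>
    intro i hK
    by_cases hlen : sent.length ≤ i
    · constructor
      · intro qs lastN la lt _
        rw [pvF_stop sent i hlen, pvBLoop_stop sent _ i hlen]
      · intro hi; omega
    · push_neg at hlen
      -- Part 2 first (it only uses the IH at strictly smaller measures)
      have h2 : ∀ (hi : i < sent.length), pvNNP (sent[i]).2 = true →
          ∀ (qs : List (String × String)) (la : String) (lt : List String),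
            (pvF sent (i + 1) (qs ++ [(PySem.Str.join " " lt, la)], (i : Int), la, lt)).1
            = pvBLoop sent (sent.map (fun tp => tp.1)) (i + pvRunLen sent (i + 1) + 1)
                (qs ++ [(PySem.Str.join " "
                           ((List.range' (i + 1) (pvRunLen sent (i + 1))).foldl
                              (fun l k => l.set k "") lt),
                         (((sent.map (fun tp => tp.1)).drop (i + 1)).take (pvRunLen sent (i + 1))).foldl
                           (fun a t => a ++ " " ++ t) la)]) := by
        intro hi _ qs la lt
        by_cases h1 : i + 1 < sent.length
        · by_cases hn1 : pvNNP (sent[i + 1]).2 = true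
          · -- run continues at i+1: A pops and patches; recurse with the IH's part 2
            have hr := pvRunLen_pos sent (i + 1) h1 hn1
            rw [pvF_cons sent (i + 1) h1]
            have hstep : pvAStep sent (qs ++ [(PySem.Str.join " " lt, la)], (i : Int), la, lt)
                ((((i : Nat) + 1 : Nat) : Int), sent[i + 1])
                = (qs ++ [(PySem.Str.join " " (lt.set (i + 1) ""), la ++ " " ++ (sent[i + 1]).1)],
                   (((i : Nat) + 1 : Nat) : Int), la ++ " " ++ (sent[i + 1]).1, lt.set (i + 1) "") := by
              have hcast : PySem.List.pySetD lt ((i : Int) + 1) "" = lt.set (i + 1) "" := by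
                simpa using PySem.List.pySetD_natCast lt (i + 1) ""
              simp [pvAStep, hn1, hcast]   -- the == test ↑(i+1) - 1 == ↑i holds by simp's cast arithmetic
            rw [hstep]
            have := (ih (i + 1) (by omega)).2 h1 hn1 qs (la ++ " " ++ (sent[i + 1]).1) (lt.set (i + 1) "")
            rw [this, hr]
            have hix : i + (pvRunLen sent (i + 1 + 1) + 1) + 1 = i + 1 + pvRunLen sent (i + 1 + 1) + 1 := by omega
            rw [hix]
            -- blanked: range' (i+1) (r+1) = (i+1) :: range' (i+2) r;
            -- answer: take (r+1) of drop (i+1) = toks[i+1] :: take r of drop (i+2)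
            have h1m : i + 1 < (sent.map (fun tp => tp.1)).length := by simpa using h1
            have hdt : ((sent.map (fun tp => tp.1)).drop (i + 1)).take (pvRunLen sent (i + 1 + 1) + 1)
                = (sent[i + 1]).1 :: ((sent.map (fun tp => tp.1)).drop (i + 1 + 1)).take (pvRunLen sent (i + 1 + 1)) := by
              rw [List.drop_eq_getElem_cons h1m, List.take_succ_cons]; simp
            rw [hdt, List.foldl_cons, List.range'_succ, List.foldl_cons]
          · -- run ends: the next token exists but is not NNP/NNPS
            rw [Bool.not_eq_true] at hn1
            have hr := pvRunLen_neg sent (i + 1) h1 hn1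
            rw [pvF_cons sent (i + 1) h1]
            have hstep : pvAStep sent (qs ++ [(PySem.Str.join " " lt, la)], (i : Int), la, lt)
                ((((i : Nat) + 1 : Nat) : Int), sent[i + 1])
                = (qs ++ [(PySem.Str.join " " lt, la)], (i : Int), la, lt) := by
              simp [pvAStep, hn1]
            rw [hstep]
            have := ((ih (i + 2) (by omega)).1) (qs ++ [(PySem.Str.join " " lt, la)]) (i : Int) la lt
              (by push_cast; omega)
            rw [this, hr]
            rw [pvBLoop_skip sent _ (i + 1) h1 hn1]
            simp
        · -- the run ends the sentence
          push_neg at h1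
          have hr := pvRunLen_stop sent (i + 1) h1
          rw [pvF_stop sent (i + 1) h1, hr, pvBLoop_stop sent _ (i + 0 + 1) (by omega)]
          simp
      refine ⟨?_, h2⟩
      intro qs lastN la lt hfresh
      rw [pvF_cons sent i hlen]
      by_cases hn : pvNNP (sent[i]).2 = true
      · -- run starts at i: A takes the else branch (last_n < i-1)
        have hstep : pvAStep sent (qs, lastN, la, lt) ((i : Int), sent[i])
            = (qs ++ [(PySem.Str.join " " ((sent.map (fun tp => tp.1)).set i "__________"), (sent[i]).1)],
               (i : Int), (sent[i]).1, (sent.map (fun tp => tp.1)).set i "__________") := by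
          have hc : (((i : Int) - 1) == lastN) = false := by
            simp only [beq_eq_false_iff_ne]; omega
          simp [pvAStep, hn, hc, PySem.List.pySetD_natCast]
        rw [hstep]
        have := h2 hlen hn qs (sent[i]).1 ((sent.map (fun tp => tp.1)).set i "__________")
        rw [this, pvBLoop_run sent _ i hlen hn]
        unfold pvBlank
        -- join of the slice = A's left-to-right accumulation starting from token i
        have him : i < (sent.map (fun tp => tp.1)).length := by simpa using hlen
        have hdt : ((sent.map (fun tp => tp.1)).drop i).take (pvRunLen sent (i + 1) + 1)
            = (sent[i]).1 :: ((sent.map (fun tp => tp.1)).drop (i + 1)).take (pvRunLen sent (i + 1)) := by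
          rw [List.drop_eq_getElem_cons him, List.take_succ_cons]; simp
        rw [hdt, pvJoin_run]
      · rw [Bool.not_eq_true] at hn
        have hstep : pvAStep sent (qs, lastN, la, lt) ((i : Int), sent[i]) = (qs, lastN, la, lt) := by
          simp [pvAStep, hn]
        rw [hstep]
        have := ((ih (i + 1) (by omega)).1) qs lastN la lt (by push_cast at hfresh ⊢; omega)
        rw [this, pvBLoop_skip sent _ i hlen hn]

-- per-sentence step equality
lemma pvSent (qs : List (String × String)) (sent : List (String × String)) :
    ((PySem.List.enumerate sent 0).foldl (pvAStep sent) (qs, -2, "", [])).1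
      = pvBLoop sent (sent.map (fun tp => tp.1)) 0 qs := by
  have h := ((pvMain sent sent.length 0 (by omega)).1) qs (-2) "" [] (by norm_num)
  unfold pvF at h
  simpa using h

-- ===== VERDICT (by name: the statement is the Claim_ definition above) =====
theorem question_generation_spec : Claim_equal_question_generation := by
  intro selected_sents _
  unfold Spec_question_generation question_generation question_generation_alt
  apply PySem.List.foldl_congr_mem
  intro qs sent _
  exact pvSent qs sent
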